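-- pv_equiv track=rewrite | github.com/ncavchl/Python-study | programmers/level1/모의고사.py | solution
-- ===== SOURCE A (Python) =====
-- def solution(answers):
--
--     first = [1,2,3,4,5]
--     second = [2,1,2,3,2,4,2,5]
--     third = [3,3,1,1,2,2,4,4,5,5]
--     fc=0
--     sc=0
--     th=0
--     i=0
--     for ans in answers:
--         if ans == first[i%5]:
--             fc +=1
--         if ans == second[i%8]:
--             sc +=1
--         if ans == third[i%10]:
--             th +=1
--         i+=1
--
--
--     MAX = max(fc,sc,th)
--     answer = []
--     if MAX == fc: answer.append(1)
--     if MAX == sc: answer.append(2)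
--     if MAX == th: answer.append(3)
--     return answer
-- ===== SOURCE B (Python) =====
-- def solution(answers):
--     # Histogram of answers bucketed by position modulo 40 (lcm of the pattern
--     # periods 5, 8, 10): one buildup pass, then each pattern is scored from the
--     # 40-bucket histogram without rescanning the answers.
--     cnt = {}
--     for i, a in enumerate(answers):
--         key = (i % 40, a)
--         cnt[key] = cnt.get(key, 0) + 1
--     patterns = [[1, 2, 3, 4, 5], [2, 1, 2, 3, 2, 4, 2, 5], [3, 3, 1, 1, 2, 2, 4, 4, 5, 5]]
--     scores = [sum(cnt.get((j, p[j % len(p)]), 0) for j in range(40)) for p in patterns]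
--     best = max(scores)
--     return [k + 1 for k, s in enumerate(scores) if s == best]
-- ===== Notes on version B (the rewrite author's own statement) =====
-- stated objective: alternative
-- what changed: Replaces A's single loop of per-pattern comparisons by a positional-histogram algorithm: one pass buckets answer counts by (index mod 40, value) (40 = lcm of the pattern periods), then each pattern's score is read off the 40-bucket histogram in O(1) per bucket without re-examining the answers, and winners are selected by an enumerate-filter comprehension.
import Mathlib
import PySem

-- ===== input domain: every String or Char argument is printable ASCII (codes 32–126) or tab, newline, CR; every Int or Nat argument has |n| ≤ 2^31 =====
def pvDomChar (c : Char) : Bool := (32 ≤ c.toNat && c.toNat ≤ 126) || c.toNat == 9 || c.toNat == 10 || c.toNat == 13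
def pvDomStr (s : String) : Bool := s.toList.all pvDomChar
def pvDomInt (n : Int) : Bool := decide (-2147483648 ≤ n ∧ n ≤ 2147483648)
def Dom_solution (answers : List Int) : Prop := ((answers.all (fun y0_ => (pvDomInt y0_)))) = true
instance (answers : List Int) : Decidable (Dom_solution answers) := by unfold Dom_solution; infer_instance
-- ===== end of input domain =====

-- B replaces A's single interleaved comparison loop by a positional histogram keyed by
-- (index mod 40, value) from which every pattern score is read off (alternative algorithm).


-- ===== PORT A =====
-- A's loop body: tests ans against each pattern at index i mod len, then increments i.
-- Indices i%5, i%8, i%10 are always in range, so pyGetD with default 0 is exact here.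
def stepA (st : Int × Int × Int × Int) (ans : Int) : Int × Int × Int × Int :=
  let fc := if ans = PySem.List.pyGetD ([1,2,3,4,5] : List Int) (PySem.Int.mod st.2.2.2 5) 0 then st.1 + 1 else st.1
  let sc := if ans = PySem.List.pyGetD ([2,1,2,3,2,4,2,5] : List Int) (PySem.Int.mod st.2.2.2 8) 0 then st.2.1 + 1 else st.2.1
  let th := if ans = PySem.List.pyGetD ([3,3,1,1,2,2,4,4,5,5] : List Int) (PySem.Int.mod st.2.2.2 10) 0 then st.2.2.1 + 1 else st.2.2.1
  (fc, sc, th, st.2.2.2 + 1)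

def solution (answers : List Int) : List Int :=
  let s := answers.foldl stepA (0, 0, 0, 0)
  let fc := s.1
  let sc := s.2.1
  let th := s.2.2.1
  let MAX := max (max fc sc) th
  let answer : List Int := []
  let answer := if MAX = fc then answer ++ [1] else answer
  let answer := if MAX = sc then answer ++ [2] else answer
  let answer := if MAX = th then answer ++ [3] else answer
  answer

-- ===== PORT B =====
-- Source B's histogram-building loop: cnt[(i % 40, a)] = cnt.get((i % 40, a), 0) + 1.
def buildCnt (answers : List Int) : PySem.Dict (Int × Int) Int :=
  (PySem.List.enumerate answers 0).foldl
    (fun d p => d.insert (PySem.Int.mod p.1 40, p.2) (d.getD (PySem.Int.mod p.1 40, p.2) 0 + 1))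
    PySem.Dict.empty

-- Source B's per-pattern score: sum(cnt.get((j, p[j % len(p)]), 0) for j in range(40)).
-- The index j % len(p) is always in range, so pyGetD with default 0 is exact here.
def scoreHist (cnt : PySem.Dict (Int × Int) Int) (pat : List Int) : Int :=
  ((PySem.List.pyRange 0 40 1).map
    (fun j => cnt.getD (j, PySem.List.pyGetD pat (PySem.Int.mod j (pat.length : Int)) 0) 0)).sum

def solution_alt (answers : List Int) : List Int :=
  let cnt := buildCnt answers
  let patterns : List (List Int) := [[1,2,3,4,5], [2,1,2,3,2,4,2,5], [3,3,1,1,2,2,4,4,5,5]]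
  let scores := patterns.map (scoreHist cnt)
  let best := (PySem.List.max? scores (fun x => x)).getD 0
  ((PySem.List.enumerate scores 0).filter (fun p => decide (p.2 = best))).map (fun p => p.1 + 1)

-- ===== PRECONDITION & SPEC =====
def Spec_solution (answers : List Int) (out : List Int) : Prop := out = solution_alt answers
instance (answers : List Int) (out : List Int) : Decidable (Spec_solution answers out) := by unfold Spec_solution; infer_instance

-- ===== CLAIM (what is proved, stated in full; the proofs are below) =====
def Claim_equal_solution : Prop := ∀ (answers : List Int), Dom_solution answers → Spec_solution answers (solution answers)

-- ===== LEMMAS AND PROOFS =====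

-- Direct count of matches for `pat`, starting at index i (proof helper linking both sides).
def scoreFrom (pat : List Int) (l : List Int) (i : Int) : Int :=
  ((PySem.List.enumerate l i).map
    (fun p => if p.2 = PySem.List.pyGetD pat (PySem.Int.mod p.1 (pat.length : Int)) 0 then (1 : Int) else 0)).sum

theorem scoreFrom_nil (pat : List Int) (i : Int) : scoreFrom pat [] i = 0 := rfl

theorem scoreFrom_cons (pat : List Int) (a : Int) (l : List Int) (i : Int) :
    scoreFrom pat (a :: l) i =
      (if a = PySem.List.pyGetD pat (PySem.Int.mod i (pat.length : Int)) 0 then (1 : Int) else 0)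
        + scoreFrom pat l (i + 1) := by
  simp [scoreFrom, PySem.List.enumerate_cons]

theorem scoreFrom_append_singleton (pat : List Int) (l : List Int) (a : Int) :
    scoreFrom pat (l ++ [a]) 0 =
      scoreFrom pat l 0 +
        (if a = PySem.List.pyGetD pat (PySem.Int.mod (l.length : Int) (pat.length : Int)) 0
          then (1 : Int) else 0) := by
  simp [scoreFrom, PySem.List.enumerate_append, PySem.List.enumerate_cons]

-- A's fold computes the three direct match counts plus the running index.
theorem foldA_eq (l : List Int) : ∀ (fc sc th i : Int),
    l.foldl stepA (fc, sc, th, i) =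
      (fc + scoreFrom [1,2,3,4,5] l i,
       sc + scoreFrom [2,1,2,3,2,4,2,5] l i,
       th + scoreFrom [3,3,1,1,2,2,4,4,5,5] l i,
       i + l.length) := by
  induction l with
  | nil => intro fc sc th i; simp [scoreFrom_nil]
  | cons a l ih =>
    intro fc sc th i
    rw [List.foldl_cons, show stepA (fc, sc, th, i) a =
      ((if a = PySem.List.pyGetD ([1,2,3,4,5] : List Int) (PySem.Int.mod i 5) 0 then fc + 1 else fc),
       (if a = PySem.List.pyGetD ([2,1,2,3,2,4,2,5] : List Int) (PySem.Int.mod i 8) 0 then sc + 1 else sc),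
       (if a = PySem.List.pyGetD ([3,3,1,1,2,2,4,4,5,5] : List Int) (PySem.Int.mod i 10) 0 then th + 1 else th),
       i + 1) from rfl, ih]
    rw [scoreFrom_cons, scoreFrom_cons, scoreFrom_cons]
    refine Prod.ext ?_ (Prod.ext ?_ (Prod.ext ?_ ?_)) <;> simp <;>
      first
      | (split_ifs <;> ring)
      | ring

-- Summing an indicator pinned to one member of a duplicate-free list picks out its value.
theorem sum_map_ite_eq_of_nodup (R : List Int) (hR : R.Nodup) (m : Int) (hm : m ∈ R) (c : Int) :
    (R.map (fun j => if j = m then c else 0)).sum = c := by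
  induction R with
  | nil => cases hm
  | cons x R ih =>
    rw [List.map_cons, List.sum_cons]
    by_cases hx : x = m
    · subst hx
      have hnot : x ∉ R := (List.nodup_cons.mp hR).1
      have hz : (R.map (fun j => if j = x then c else 0)).sum = 0 := by
        apply List.sum_eq_zero
        intro y hy
        rcases List.mem_map.mp hy with ⟨j, hj, rfl⟩
        have : j ≠ x := fun e => hnot (e ▸ hj)
        simp [this]
      simp [hz]
    · have hm' : m ∈ R := by
        rcases List.mem_cons.mp hm with h | h
        · exact absurd h.symm hx
        · exact h
      simp [hx, ih (List.nodup_cons.mp hR).2 hm']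

-- Inserting one occurrence at key (m, a) raises exactly the matching bucket's lookup by 1.
theorem scoreHist_insert (pat : List Int) (d : PySem.Dict (Int × Int) Int) (m a : Int)
    (hm : m ∈ PySem.List.pyRange 0 40 1) :
    scoreHist (d.insert (m, a) (d.getD (m, a) 0 + 1)) pat =
      scoreHist d pat +
        (if a = PySem.List.pyGetD pat (PySem.Int.mod m (pat.length : Int)) 0 then (1 : Int) else 0) := by
  unfold scoreHist
  have hpt : ∀ j : Int,
      (d.insert (m, a) (d.getD (m, a) 0 + 1)).getD
          (j, PySem.List.pyGetD pat (PySem.Int.mod j (pat.length : Int)) 0) 0 =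
        d.getD (j, PySem.List.pyGetD pat (PySem.Int.mod j (pat.length : Int)) 0) 0 +
          (if j = m then
            (if a = PySem.List.pyGetD pat (PySem.Int.mod m (pat.length : Int)) 0 then (1 : Int) else 0)
          else 0) := by
    intro j
    rw [PySem.Dict.getD_insert]
    by_cases hj : j = m
    · subst hj
      by_cases hv : a = PySem.List.pyGetD pat (PySem.Int.mod j (pat.length : Int)) 0
      · simp [hv]
      · have : ((j, PySem.List.pyGetD pat (PySem.Int.mod j (pat.length : Int)) 0) :
            Int × Int) ≠ (j, a) := by
          simp [Prod.ext_iff]; exact fun e => hv e.symm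
        simp [this, hv]
    · have : ((j, PySem.List.pyGetD pat (PySem.Int.mod j (pat.length : Int)) 0) :
          Int × Int) ≠ (m, a) := by simp [Prod.ext_iff]; intro e; exact absurd e hj
      simp [this, hj]
  calc ((PySem.List.pyRange 0 40 1).map
          (fun j => (d.insert (m, a) (d.getD (m, a) 0 + 1)).getD
            (j, PySem.List.pyGetD pat (PySem.Int.mod j (pat.length : Int)) 0) 0)).sum
      = ((PySem.List.pyRange 0 40 1).map
          (fun j => d.getD (j, PySem.List.pyGetD pat (PySem.Int.mod j (pat.length : Int)) 0) 0 +
            (if j = m then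
              (if a = PySem.List.pyGetD pat (PySem.Int.mod m (pat.length : Int)) 0 then (1 : Int) else 0)
            else 0))).sum := by
        exact congrArg List.sum (List.map_congr_left (fun j _ => hpt j))
    _ = _ := by
        rw [PySem.List.sum_map_add_int,
          sum_map_ite_eq_of_nodup _ (PySem.List.nodup_pyRange_one 0 40) m hm]

-- (n % 40) % len = n % len for the pattern lengths dividing 40.
theorem mod40_mod (n L : Int) (hL : 0 < L) (hdvd : L ∣ 40) :
    PySem.Int.mod (PySem.Int.mod n 40) L = PySem.Int.mod n L := by
  rw [PySem.Int.mod_eq_emod_of_pos (by norm_num : (0:Int) < 40),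
    PySem.Int.mod_eq_emod_of_pos hL, PySem.Int.mod_eq_emod_of_pos hL,
    Int.emod_emod_of_dvd _ hdvd]

-- B's histogram score equals the direct match count, for any pattern of length dividing 40.
theorem scoreHist_eq_scoreFrom (pat : List Int) (hL : 0 < (pat.length : Int))
    (hdvd : (pat.length : Int) ∣ 40) (l : List Int) :
    scoreHist (buildCnt l) pat = scoreFrom pat l 0 := by
  induction l using List.reverseRecOn with
  | nil => simp [scoreHist, buildCnt, scoreFrom, PySem.List.enumerate_nil]
  | append_singleton l a ih =>
    have hbuild : buildCnt (l ++ [a]) =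
        (buildCnt l).insert (PySem.Int.mod (l.length : Int) 40, a)
          ((buildCnt l).getD (PySem.Int.mod (l.length : Int) 40, a) 0 + 1) := by
      unfold buildCnt
      rw [PySem.List.enumerate_append, List.foldl_append]
      simp [PySem.List.enumerate_cons]
    have hmem : PySem.Int.mod (l.length : Int) 40 ∈ PySem.List.pyRange 0 40 1 := by
      rw [PySem.List.mem_pyRange_one]
      exact ⟨PySem.Int.mod_nonneg _ (by norm_num), PySem.Int.mod_lt _ (by norm_num)⟩
    rw [hbuild, scoreHist_insert pat (buildCnt l) _ a hmem, ih,
      scoreFrom_append_singleton,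
      mod40_mod (l.length : Int) (pat.length : Int) hL hdvd]

-- ===== VERDICT (by name: the statement is the Claim_ definition above) =====
theorem solution_spec : Claim_equal_solution := by
  intro answers _
  unfold Spec_solution solution solution_alt
  rw [foldA_eq]
  simp only [List.map_cons, List.map_nil, zero_add]
  simp only [scoreHist_eq_scoreFrom [1,2,3,4,5] (by norm_num) (by norm_num),
    scoreHist_eq_scoreFrom [2,1,2,3,2,4,2,5] (by norm_num) (by norm_num),
    scoreHist_eq_scoreFrom [3,3,1,1,2,2,4,4,5,5] (by norm_num) (by norm_num)]
  set fc := scoreFrom [1,2,3,4,5] answers 0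
  set sc := scoreFrom [2,1,2,3,2,4,2,5] answers 0
  set th := scoreFrom [3,3,1,1,2,2,4,4,5,5] answers 0
  have hbest : (PySem.List.max? [fc, sc, th] (fun x => x)).getD 0 = max (max fc sc) th := by
    by_cases h1 : fc < sc <;> by_cases h2 : sc < th <;> by_cases h3 : fc < th <;>
      simp [PySem.List.max?, h1, h2, h3] <;> omega
  simp only [hbest]
  simp only [PySem.List.enumerate_cons, PySem.List.enumerate_nil, List.filter]
  set M := max (max fc sc) th with hM
  have hfc : fc ≤ M := by omega
  have hsc : sc ≤ M := by omega
  have hth : th ≤ M := by omega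
  have hor : M = fc ∨ M = sc ∨ M = th := by omega
  clear_value M
  by_cases h1 : fc = M <;> by_cases h2 : sc = M <;> by_cases h3 : th = M <;>
    simp [h1, h2, h3, eq_comm (a := M)]
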